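-- pv_equiv track=rewrite | github.com/Samacole/coursera | Week2all.py | neghbours
-- ===== SOURCE A (Python) =====
-- def hammingdistance(p, q):
--     count = 0
--     Ham = 0
--     for i in range(0, len(p)):
--         if p[count] == q[count]:
--             count +=1
--         else:
--             Ham += 1
--             count += 1
--     return Ham
--
-- def neghbours(pattern, d):
--     if d == 0:
--         return [pattern]
--     if len(pattern) == 1:
--         return ["A", "C", "G", "T"]
--     Neghbourhood = []
--     suffixnegh = neghbours(pattern[1:], d)
--     for text in suffixnegh:
--         if hammingdistance(pattern[1:], text) < d:
--             for x in ["A", "C", "G", "T"]: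
--                 Neghbourhood.append(x + text)
--         else:
--             Neghbourhood.append(pattern[:1] + text)
--     return (Neghbourhood)
-- ===== SOURCE B (Python) =====
-- def hammingdistance(p, q):
--     count = 0
--     Ham = 0
--     for i in range(0, len(p)):
--         if p[count] == q[count]:
--             count +=1
--         else:
--             Ham += 1
--             count += 1
--     return Ham
--
-- def neghbours(pattern, d):
--     if d == 0:
--         return [pattern]
--     neighborhood = ["A", "C", "G", "T"]
--     for i in range(len(pattern) - 2, -1, -1):
--         suffix = pattern[i+1:]
--         new = []
--         for text in neighborhood:
--             if hammingdistance(suffix, text) < d: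
--                 for x in ["A", "C", "G", "T"]:
--                     new.append(x + text)
--             else:
--                 new.append(pattern[i] + text)
--         neighborhood = new
--     return neighborhood
-- ===== Notes on version B (the rewrite author's own statement) =====
-- stated objective: alternative
-- what changed: Replaces A's suffix recursion by an explicit iteration over positions from last to first, carrying the growing neighborhood list as an accumulator; d==0 short-circuits and the single-character base case falls out of the empty loop.
import Mathlib
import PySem

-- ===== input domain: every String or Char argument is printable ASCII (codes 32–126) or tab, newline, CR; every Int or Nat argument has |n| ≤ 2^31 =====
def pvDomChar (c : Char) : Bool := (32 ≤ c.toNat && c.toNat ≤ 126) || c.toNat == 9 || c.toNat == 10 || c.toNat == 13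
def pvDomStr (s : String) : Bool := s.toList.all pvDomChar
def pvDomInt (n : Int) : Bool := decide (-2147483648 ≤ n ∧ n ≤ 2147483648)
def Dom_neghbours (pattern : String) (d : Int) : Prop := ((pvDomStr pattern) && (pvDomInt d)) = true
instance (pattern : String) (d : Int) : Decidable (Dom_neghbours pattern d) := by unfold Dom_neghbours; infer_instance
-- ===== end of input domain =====

-- B replaces A's suffix recursion by an explicit last-to-first iteration over positions (same cost, different decomposition); return-value order is identical.

-- ===== PORT A =====
-- shared module helper hammingdistance (count always stays in range of p in every call made here;
-- getD's default is never consulted on the ports' call sites where |q| = |p|)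
def hamA (p q : List Char) : Int :=
  ((List.range p.length).foldl
    (fun (st : Nat × Int) _ =>
      if p.getD st.1 ' ' = q.getD st.1 ' ' then (st.1 + 1, st.2) else (st.1 + 1, st.2 + 1))
    (0, 0)).2

def pvBases : List (List Char) := [['A'], ['C'], ['G'], ['T']]

-- A's recursion over the pattern's characters; on pattern = [] with d ≠ 0 Python recurses forever
-- (RecursionError) — that input is outside Pre_neghbours and the port returns [] there.
def neghboursL (pattern : List Char) (d : Int) : List (List Char) :=
  if d = 0 then [pattern]
  else
    match pattern with
    | [] => []
    | c :: rest =>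
      if rest = [] then pvBases
      else
        (neghboursL rest d).foldl
          (fun acc text =>
            if hamA rest text < d then
              acc ++ (['A', 'C', 'G', 'T'].map (fun x => x :: text))
            else acc ++ [c :: text]) []

def neghbours (pattern : String) (d : Int) : List String :=
  (neghboursL pattern.toList d).map String.ofList

-- ===== PORT B =====
def altStep (d : Int) (cs : List Char) (nb : List (List Char)) (i : Nat) : List (List Char) :=
  nb.foldl
    (fun acc text =>
      if hamA (cs.drop (i + 1)) text < d then
        acc ++ (['A', 'C', 'G', 'T'].map (fun x => x :: text))
      else acc ++ [cs.getD i ' ' :: text]) []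

-- B: iterate i = len-2, …, 0 (Python's range(len(pattern)-2, -1, -1))
def neghboursAltL (cs : List Char) (d : Int) : List (List Char) :=
  if d = 0 then [cs]
  else ((List.range (cs.length - 1)).reverse).foldl (altStep d cs) pvBases

def neghbours_alt (pattern : String) (d : Int) : List String :=
  (neghboursAltL pattern.toList d).map String.ofList

-- ===== PRECONDITION & SPEC =====
-- Pre_ excludes only the empty pattern with d ≠ 0, on which A recurses forever (RecursionError).
def Pre_neghbours (pattern : String) (d : Int) : Prop := d = 0 ∨ pattern.toList ≠ []
instance (pattern : String) (d : Int) : Decidable (Pre_neghbours pattern d) := by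
  unfold Pre_neghbours; infer_instance

def pvWitness_neghbours : String × Int := ("AC", 1)

def Spec_neghbours (pattern : String) (d : Int) (out : List String) : Prop := out = neghbours_alt pattern d
instance (pattern : String) (d : Int) (out : List String) : Decidable (Spec_neghbours pattern d out) := by unfold Spec_neghbours; infer_instance

-- ===== CLAIM (what is proved, stated in full; the proofs are below) =====
def Claim_equal_neghbours : Prop := ∀ (pattern : String) (d : Int), Dom_neghbours pattern d → Pre_neghbours pattern d → Spec_neghbours pattern d (neghbours pattern d)

-- ===== LEMMAS AND PROOFS =====

lemma altStep_shift (d : Int) (c : Char) (rest : List Char) (nb : List (List Char)) (j : Nat) :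
    altStep d (c :: rest) nb (j + 1) = altStep d rest nb j := by
  simp [altStep]

lemma key (cs : List Char) (d : Int) (hd : d ≠ 0) (hne : cs ≠ []) :
    neghboursAltL cs d = neghboursL cs d := by
  induction cs with
  | nil => exact absurd rfl hne
  | cons c rest ih =>
    by_cases hrest : rest = []
    · subst hrest
      simp [neghboursAltL, neghboursL, hd]
    · have hlen : rest.length - 1 + 1 = rest.length := by
        have := List.length_pos_iff.mpr hrest; omega
      unfold neghboursAltL neghboursL
      simp only [if_neg hd]
      have hrange : (List.range ((c :: rest).length - 1)).reverse
          = ((List.range (rest.length - 1)).reverse.map (· + 1)) ++ [0] := by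
        simp only [List.length_cons, Nat.add_sub_cancel]
        rw [← hlen, List.range_succ_eq_map]
        simp [List.map_reverse]
      rw [hrange, List.foldl_append, List.foldl_map]
      have hcongr : (List.range (rest.length - 1)).reverse.foldl
            (fun nb j => altStep d (c :: rest) nb (j + 1)) pvBases
          = (List.range (rest.length - 1)).reverse.foldl (altStep d rest) pvBases := by
        simp only [altStep_shift]
      rw [hcongr]
      have hih : (List.range (rest.length - 1)).reverse.foldl (altStep d rest) pvBases
          = neghboursL rest d := by
        rw [← ih hrest]
        unfold neghboursAltL
        simp [if_neg hd]
      rw [hih]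
      simp [altStep, List.foldl_cons, hrest]

-- ===== VERDICT (by name: the statement is the Claim_ definition above) =====
theorem neghbours_spec : Claim_equal_neghbours := by
  intro pattern d _ hpre
  unfold Spec_neghbours neghbours neghbours_alt
  by_cases hd : d = 0
  · subst hd
    have h1 : neghboursL pattern.toList 0 = [pattern.toList] := by
      unfold neghboursL; simp
    have h2 : neghboursAltL pattern.toList 0 = [pattern.toList] := by
      unfold neghboursAltL; simp
    rw [h1, h2]
  · have hne : pattern.toList ≠ [] := hpre.resolve_left hd
    rw [key pattern.toList d hd hne]
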